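-- pv_equiv track=rewrite | github.com/Shinglington/MyCipher2 | MyCryptanalysis/attack_vigenere.py | guess_likely_keywords
-- ===== SOURCE A (Python) =====
-- def guess_likely_keywords(column_keys):
-- 	keywords = ["" * len(column_keys)]
-- 	for i in range(len(column_keys)):
-- 			key_letters = column_keys[i]
-- 			new_keywords = []
-- 			for j in range(len(keywords)):
-- 				for k in key_letters:
-- 					new_keywords.append(keywords[j] + k)
-- 			keywords = new_keywords
-- 	return keywords
-- ===== SOURCE B (Python) =====
-- def guess_likely_keywords(column_keys):
--     if not column_keys:
--         return [""]
--     suffixes = guess_likely_keywords(column_keys[1:])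
--     return [letter + s for letter in column_keys[0] for s in suffixes]
-- ===== Notes on version B (the rewrite author's own statement) =====
-- stated objective: simpler
-- what changed: Replaces the iterative prefix-extension (rebuilding the whole keyword list once per column, appending letters on the right) by structural recursion on the column list that prepends each first-column letter to the recursively built suffixes.
import Mathlib
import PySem

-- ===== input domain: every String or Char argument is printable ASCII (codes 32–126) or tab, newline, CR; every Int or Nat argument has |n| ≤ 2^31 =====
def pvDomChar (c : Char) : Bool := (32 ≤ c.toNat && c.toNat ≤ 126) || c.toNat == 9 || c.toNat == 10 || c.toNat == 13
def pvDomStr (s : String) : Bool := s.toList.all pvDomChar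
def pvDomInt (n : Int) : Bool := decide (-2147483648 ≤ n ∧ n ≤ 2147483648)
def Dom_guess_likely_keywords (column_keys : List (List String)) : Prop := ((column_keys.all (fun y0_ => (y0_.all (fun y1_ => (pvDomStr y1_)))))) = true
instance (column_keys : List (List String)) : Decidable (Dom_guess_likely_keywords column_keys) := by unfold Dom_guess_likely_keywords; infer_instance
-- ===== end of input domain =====

-- B replaces A's iterative prefix-extension (rebuilding the keyword list once per column)
-- by structural recursion on the columns, prepending each first-column letter to the
-- recursively built suffixes; objective: simpler (not faster).

-- ===== PORT A =====
-- the two inner loops of A: for j in range(len(keywords)): for k in key_letters: new_keywords.append(keywords[j] + k)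
def pvInnerA (keywords key_letters : List String) : List String :=
  (PySem.List.pyRange 0 keywords.length 1).foldl
    (fun new_keywords j =>
      key_letters.foldl (fun nk k => nk ++ [PySem.List.pyGetD keywords j "" ++ k]) new_keywords)
    []

-- note: Python's initial list is ["" * len(column_keys)], and "" * n is always ""
def guess_likely_keywords (column_keys : List (List String)) : List String :=
  (PySem.List.pyRange 0 column_keys.length 1).foldl
    (fun keywords i => pvInnerA keywords (PySem.List.pyGetD column_keys i []))
    [""]

-- ===== PORT B =====
def guess_likely_keywords_alt (column_keys : List (List String)) : List String :=
  match column_keys with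
  | [] => [""]
  | col :: rest =>
    let suffixes := guess_likely_keywords_alt rest
    col.flatMap (fun letter => suffixes.map (fun s => letter ++ s))

-- ===== PRECONDITION & SPEC =====
def Spec_guess_likely_keywords (column_keys : List (List String)) (out : List String) : Prop := out = guess_likely_keywords_alt column_keys
instance (column_keys : List (List String)) (out : List String) : Decidable (Spec_guess_likely_keywords column_keys out) := by unfold Spec_guess_likely_keywords; infer_instance

-- ===== CLAIM (what is proved, stated in full; the proofs are below) =====
def Claim_equal_guess_likely_keywords : Prop := ∀ (column_keys : List (List String)), Dom_guess_likely_keywords column_keys → Spec_guess_likely_keywords column_keys (guess_likely_keywords column_keys)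

-- ===== LEMMAS AND PROOFS =====

theorem pvInnerA_eq (keywords key_letters : List String) :
    pvInnerA keywords key_letters
      = keywords.flatMap (fun p => key_letters.map (fun k => p ++ k)) := by
  unfold pvInnerA
  rw [PySem.List.foldl_pyRange_zero_pyGetD' keywords ""
      (fun nk p => key_letters.foldl (fun nk k => nk ++ [p ++ k]) nk) []]
  simp only [PySem.List.foldl_append_singleton_eq_map, PySem.List.foldl_append_eq_flatMap,
    List.nil_append]

theorem pvFoldl_flatMap (cols : List (List String)) :
    ∀ acc : List String,
      cols.foldl (fun ks col => ks.flatMap (fun p => col.map (fun k => p ++ k))) acc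
        = acc.flatMap (fun p => (guess_likely_keywords_alt cols).map (fun s => p ++ s)) := by
  induction cols with
  | nil =>
      intro acc
      simp [guess_likely_keywords_alt, List.flatMap_singleton']
  | cons col cols ih =>
      intro acc
      simp only [List.foldl_cons, ih, guess_likely_keywords_alt]
      simp [List.flatMap_assoc, List.map_flatMap, List.flatMap_map, List.map_map,
            Function.comp_def, String.append_assoc]

-- ===== VERDICT (by name: the statement is the Claim_ definition above) =====
theorem guess_likely_keywords_spec : Claim_equal_guess_likely_keywords := by
  intro column_keys _
  unfold Spec_guess_likely_keywords guess_likely_keywords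
  rw [PySem.List.foldl_pyRange_zero_pyGetD' column_keys [] pvInnerA [""]]
  have h : column_keys.foldl pvInnerA [""]
      = column_keys.foldl (fun ks col => ks.flatMap (fun p => col.map (fun k => p ++ k))) [""] := by
    congr 1
    funext ks col
    exact pvInnerA_eq ks col
  rw [h, pvFoldl_flatMap]
  simp
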